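-- pv_equiv track=rewrite | github.com/Telcoltar/AdventOfCodeDay20 | main.py | rotate_tile
-- ===== SOURCE A (Python) =====
-- def rotate_tile_90(tile: list[list[int]]) -> list[list[int]]:
--     rot_tile: list[list[int]] = []
--     for i in range(len(tile)):
--         rot_tile.append([tile[j][i] for j in range(len(tile[0]) - 1, -1, -1)])
--     return rot_tile
--
-- def flip_horizontal(tile: list[list[int]]) -> list[list[int]]:
--     flip_tile: list[list[int]] = []
--     for i in range(len(tile) - 1, -1, -1):
--         flip_tile.append(tile[i])
--     return flip_tile
--
-- def flip_vertical(tile: list[list[int]]) -> list[list[int]]: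
--     flip_tile: list[list[int]] = []
--     for row in tile:
--         flip_tile.append([row[i] for i in range(len(row) - 1, -1, -1)])
--     return flip_tile
--
-- def rotate_tile(tile: list[list[int]], num: int, flip: int) -> list[list[int]]:
--     rot_tile: list[list[int]] = tile
--     for _ in range(num):
--         rot_tile = rotate_tile_90(rot_tile)
--     if flip == 1:
--         rot_tile = flip_horizontal(rot_tile)
--     elif flip == 2:
--         rot_tile = flip_vertical(rot_tile)
--     return rot_tile
-- ===== SOURCE B (Python) =====
-- def rotate_tile(tile: list[list[int]], num: int, flip: int) -> list[list[int]]: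
--     n = len(tile)
--     r = num % 4 if num > 0 else 0
--     if r == 0:
--         g = tile
--     elif r == 1:
--         g = [[tile[n - 1 - k][i] for k in range(n)] for i in range(n)]
--     elif r == 2:
--         g = [[tile[n - 1 - i][n - 1 - k] for k in range(n)] for i in range(n)]
--     else:
--         g = [[tile[k][n - 1 - i] for k in range(n)] for i in range(n)]
--     if flip == 1:
--         g = g[::-1]
--     elif flip == 2:
--         g = [row[::-1] for row in g]
--     return g
-- ===== Notes on version B (the rewrite author's own statement) =====
-- stated objective: simpler
-- what changed: B reduces the rotation count to r = num % 4 (0 for num <= 0) and builds the rotated grid in one pass from a closed-form coordinate mapping per r, instead of applying the transpose-and-reverse loop num times; flips are single slice reversals.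
-- outside the precondition, e.g. on rotate_tile([[]], 1, 0): A returns [[]], B raises IndexError; on rotate_tile([[1, 2], [3, 4, 9]], 4, 0): A returns [[1, 2], [3, 4]], B returns [[1, 2], [3, 4, 9]]
import Mathlib
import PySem

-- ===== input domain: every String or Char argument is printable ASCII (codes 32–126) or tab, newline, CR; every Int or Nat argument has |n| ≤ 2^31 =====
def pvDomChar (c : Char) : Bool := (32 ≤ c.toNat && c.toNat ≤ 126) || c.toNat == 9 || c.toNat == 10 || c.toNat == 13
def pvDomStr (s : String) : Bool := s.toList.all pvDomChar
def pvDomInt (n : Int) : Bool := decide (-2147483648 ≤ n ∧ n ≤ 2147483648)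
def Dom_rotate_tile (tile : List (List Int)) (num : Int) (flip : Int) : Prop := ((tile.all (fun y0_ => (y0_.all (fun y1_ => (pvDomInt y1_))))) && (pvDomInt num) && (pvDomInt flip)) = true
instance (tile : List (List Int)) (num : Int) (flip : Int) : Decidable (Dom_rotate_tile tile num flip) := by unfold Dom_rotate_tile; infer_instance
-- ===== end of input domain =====

-- B replaces A's num-fold rotation loop by one closed-form coordinate mapping for num % 4 (simpler and avoids repeated rebuilding).

-- ===== PORT A =====
def rotate_tile_90 (tile : List (List Int)) : List (List Int) :=
  (List.range tile.length).foldl (fun rot (i : Nat) =>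
    rot ++ [(PySem.List.pyRange (((tile.headD []).length : Int) - 1) (-1) (-1)).map
      (fun j => PySem.List.pyGetD (PySem.List.pyGetD tile j []) (i : Int) 0)]) []

def flip_horizontal (tile : List (List Int)) : List (List Int) :=
  (PySem.List.pyRange ((tile.length : Int) - 1) (-1) (-1)).foldl
    (fun acc i => acc ++ [PySem.List.pyGetD tile i []]) []

def flip_vertical (tile : List (List Int)) : List (List Int) :=
  tile.foldl (fun acc row =>
    acc ++ [(PySem.List.pyRange ((row.length : Int) - 1) (-1) (-1)).map
      (fun i => PySem.List.pyGetD row i 0)]) []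

def rotate_tile (tile : List (List Int)) (num : Int) (flip : Int) : List (List Int) :=
  let rot := (List.range num.toNat).foldl (fun t _ => rotate_tile_90 t) tile
  if flip = 1 then flip_horizontal rot
  else if flip = 2 then flip_vertical rot
  else rot

-- ===== PORT B =====
def rotate_tile_alt (tile : List (List Int)) (num : Int) (flip : Int) : List (List Int) :=
  let n := tile.length
  let r := if num > 0 then PySem.Int.mod num 4 else 0
  let g :=
    if r = 0 then tile
    else if r = 1 then
      (List.range n).map (fun (i : Nat) => (List.range n).map (fun (k : Nat) =>
        PySem.List.pyGetD (PySem.List.pyGetD tile ((n : Int) - 1 - (k : Int)) []) (i : Int) 0))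
    else if r = 2 then
      (List.range n).map (fun (i : Nat) => (List.range n).map (fun (k : Nat) =>
        PySem.List.pyGetD (PySem.List.pyGetD tile ((n : Int) - 1 - (i : Int)) []) ((n : Int) - 1 - (k : Int)) 0))
    else
      (List.range n).map (fun (i : Nat) => (List.range n).map (fun (k : Nat) =>
        PySem.List.pyGetD (PySem.List.pyGetD tile ((k : Int)) []) ((n : Int) - 1 - (i : Int)) 0))
  if flip = 1 then g.reverse                     -- g[::-1]  (PySem.List.slice?_none_none_neg_one)
  else if flip = 2 then g.map (fun row => row.reverse)  -- row[::-1]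
  else g

-- ===== PRECONDITION & SPEC =====
-- Pre_ excludes ragged/non-square tiles combined with num ≥ 1: there A's transpose loop
-- raises IndexError except on degenerate shapes (empty first row, or rows longer than the
-- tile's height) where the emptied/truncated value it returns is accidental; B raises or
-- keeps the rows intact there (see the cited examples).
def Pre_rotate_tile (tile : List (List Int)) (num : Int) (flip : Int) : Prop :=
  num ≤ 0 ∨ ∀ row ∈ tile, row.length = tile.length
instance (tile : List (List Int)) (num : Int) (flip : Int) : Decidable (Pre_rotate_tile tile num flip) := by unfold Pre_rotate_tile; infer_instance

def pvWitness_rotate_tile : List (List Int) × Int × Int := ([[1, 2], [3, 4]], 1, 0)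

def Spec_rotate_tile (tile : List (List Int)) (num : Int) (flip : Int) (out : List (List Int)) : Prop := out = rotate_tile_alt tile num flip
instance (tile : List (List Int)) (num : Int) (flip : Int) (out : List (List Int)) : Decidable (Spec_rotate_tile tile num flip out) := by unfold Spec_rotate_tile; infer_instance

-- ===== CLAIM (what is proved, stated in full; the proofs are below) =====
def Claim_equal_rotate_tile : Prop := ∀ (tile : List (List Int)) (num : Int) (flip : Int), Dom_rotate_tile tile num flip → Pre_rotate_tile tile num flip → Spec_rotate_tile tile num flip (rotate_tile tile num flip)

-- ===== LEMMAS AND PROOFS =====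

-- square grid of side n whose (i,k) entry is f i k
def gridOf (n : Nat) (f : Nat → Nat → Int) : List (List Int) :=
  (List.range n).map (fun (i : Nat) => (List.range n).map (fun (k : Nat) => f i k))

-- total nat indexing into a grid
def nget (t : List (List Int)) (i k : Nat) : Int := (t.getD i []).getD k 0

theorem gridOf_congr {n : Nat} {f g : Nat → Nat → Int}
    (h : ∀ i k, i < n → k < n → f i k = g i k) : gridOf n f = gridOf n g := by
  unfold gridOf
  refine List.map_congr_left (fun i hi => ?_)
  exact List.map_congr_left (fun k hk =>
    h i k (List.mem_range.mp hi) (List.mem_range.mp hk))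

theorem length_gridOf (n : Nat) (f : Nat → Nat → Int) : (gridOf n f).length = n := by
  simp [gridOf]

-- descending-range read is reverse (used for A's flips)
theorem desc_map_getD {α : Type} (xs : List α) (d : α) :
    (PySem.List.pyRange ((xs.length : Int) - 1) (-1) (-1)).map
      (fun i => PySem.List.pyGetD xs i d) = xs.reverse := by
  rw [PySem.List.pyRange_neg_one]
  have hn : (((xs.length : Int) - 1) - (-1)).toNat = xs.length := by omega
  rw [hn, List.map_map]
  apply List.ext_getElem (by simp)
  intro i h1 h2
  simp only [List.getElem_map, List.getElem_range, Function.comp_apply]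
  have hi : i < xs.length := by simpa using h1
  have hcast : (xs.length : Int) - 1 - (i : Int) = ((xs.length - 1 - i : Nat) : Int) := by omega
  rw [hcast, PySem.List.pyGetD_natCast]
  rw [List.getD_eq_getElem _ _ (by omega)]
  simp [List.getElem_reverse]

theorem flip_horizontal_eq (tile : List (List Int)) : flip_horizontal tile = tile.reverse := by
  unfold flip_horizontal
  rw [PySem.List.foldl_append_singleton_eq_map]
  simpa using desc_map_getD tile []

theorem flip_vertical_eq (tile : List (List Int)) :
    flip_vertical tile = tile.map (fun row => row.reverse) := by
  unfold flip_vertical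
  rw [PySem.List.foldl_append_singleton_eq_map]
  exact List.map_congr_left (fun row _ => desc_map_getD row 0)

-- a uniform square tile IS the grid of its entries
theorem square_eq_gridOf (tile : List (List Int))
    (h : ∀ row ∈ tile, row.length = tile.length) :
    tile = gridOf tile.length (nget tile) := by
  apply List.ext_getElem (by simp [length_gridOf])
  intro i h1 h2
  have hi : i < tile.length := h1
  unfold gridOf
  simp only [List.getElem_map, List.getElem_range]
  apply List.ext_getElem
  · simp [h tile[i] (List.getElem_mem _)]
  · intro k hk1 hk2
    simp only [List.getElem_map, List.getElem_range]
    unfold nget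
    rw [List.getD_eq_getElem _ _ hi, List.getD_eq_getElem _ _ hk1]

-- one 90° rotation on a grid, in closed form
theorem rot90_gridOf (n : Nat) (f : Nat → Nat → Int) :
    rotate_tile_90 (gridOf n f) = gridOf n (fun i k => f (n - 1 - k) i) := by
  unfold rotate_tile_90
  rw [PySem.List.foldl_append_singleton_eq_map, length_gridOf]
  rcases Nat.eq_zero_or_pos n with hn | hn
  · subst hn; simp [gridOf]
  have hhead : ((gridOf n f).headD []).length = n := by
    obtain ⟨m, rfl⟩ : ∃ m, n = m + 1 := ⟨n - 1, by omega⟩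
    simp [gridOf, List.range_succ_eq_map]
  rw [hhead]
  unfold gridOf
  refine List.map_congr_left (fun i hi => ?_)
  have hi' : i < n := List.mem_range.mp hi
  rw [PySem.List.pyRange_neg_one]
  have hcnt : (((n : Int) - 1) - (-1)).toNat = n := by omega
  rw [hcnt, List.map_map]
  refine List.map_congr_left (fun k hk => ?_)
  have hk' : k < n := List.mem_range.mp hk
  simp only [Function.comp_apply]
  have hcast : (n : Int) - 1 - (k : Int) = ((n - 1 - k : Nat) : Int) := by omega
  rw [hcast, PySem.List.pyGetD_natCast, PySem.List.pyGetD_natCast]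
  have hrow : (List.map (fun i => List.map (fun k => f i k) (List.range n)) (List.range n)).getD
      (n - 1 - k) [] = List.map (fun j => f (n - 1 - k) j) (List.range n) := by
    rw [List.getD_eq_getElem _ _ (by simp; omega)]
    simp
  rw [hrow, List.getD_eq_getElem _ _ (by simp [hi'])]
  simp

-- A's rotation loop is iteration of rotate_tile_90
theorem foldl_range_iterate {α : Type} (h : α → α) (m : Nat) (x : α) :
    (List.range m).foldl (fun t _ => h t) x = h^[m] x := by
  induction m generalizing x with
  | zero => simp
  | succ m ih =>
    rw [List.range_succ, List.foldl_append, List.foldl_cons, List.foldl_nil, ih,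
      Function.iterate_succ_apply']

theorem rot90_four (n : Nat) (f : Nat → Nat → Int) :
    rotate_tile_90^[4] (gridOf n f) = gridOf n f := by
  show rotate_tile_90 (rotate_tile_90 (rotate_tile_90 (rotate_tile_90 (gridOf n f)))) = gridOf n f
  rw [rot90_gridOf, rot90_gridOf, rot90_gridOf, rot90_gridOf]
  apply gridOf_congr
  intro i k hi hk
  congr 1 <;> omega

theorem rot90_iter_mod (m n : Nat) (f : Nat → Nat → Int) :
    rotate_tile_90^[m] (gridOf n f) = rotate_tile_90^[m % 4] (gridOf n f) := by
  induction m using Nat.strong_induction_on with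
  | _ m ih =>
    rcases Nat.lt_or_ge m 4 with h | h
    · rw [Nat.mod_eq_of_lt h]
    · obtain ⟨m', rfl⟩ : ∃ m', m = m' + 4 := ⟨m - 4, by omega⟩
      rw [Function.iterate_add_apply, rot90_four, ih m' (by omega)]
      congr 1
      omega

-- B's r-branches in gridOf form
theorem bgrid1 (tile : List (List Int)) :
    (List.range tile.length).map (fun (i : Nat) => (List.range tile.length).map (fun (k : Nat) =>
      PySem.List.pyGetD (PySem.List.pyGetD tile ((tile.length : Int) - 1 - (k : Int)) []) (i : Int) 0))
    = gridOf tile.length (fun i k => nget tile (tile.length - 1 - k) i) := by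
  unfold gridOf
  refine List.map_congr_left (fun i hi => List.map_congr_left (fun k hk => ?_))
  have hk' : k < tile.length := List.mem_range.mp hk
  have hcast : (tile.length : Int) - 1 - (k : Int) = ((tile.length - 1 - k : Nat) : Int) := by omega
  rw [hcast, PySem.List.pyGetD_natCast, PySem.List.pyGetD_natCast]
  rfl

theorem bgrid2 (tile : List (List Int)) :
    (List.range tile.length).map (fun (i : Nat) => (List.range tile.length).map (fun (k : Nat) =>
      PySem.List.pyGetD (PySem.List.pyGetD tile ((tile.length : Int) - 1 - (i : Int)) []) ((tile.length : Int) - 1 - (k : Int)) 0))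
    = gridOf tile.length (fun i k => nget tile (tile.length - 1 - i) (tile.length - 1 - k)) := by
  unfold gridOf
  refine List.map_congr_left (fun i hi => List.map_congr_left (fun k hk => ?_))
  have hi' : i < tile.length := List.mem_range.mp hi
  have hk' : k < tile.length := List.mem_range.mp hk
  have hcast1 : (tile.length : Int) - 1 - (i : Int) = ((tile.length - 1 - i : Nat) : Int) := by omega
  have hcast2 : (tile.length : Int) - 1 - (k : Int) = ((tile.length - 1 - k : Nat) : Int) := by omega
  rw [hcast1, hcast2, PySem.List.pyGetD_natCast, PySem.List.pyGetD_natCast]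
  rfl

theorem bgrid3 (tile : List (List Int)) :
    (List.range tile.length).map (fun (i : Nat) => (List.range tile.length).map (fun (k : Nat) =>
      PySem.List.pyGetD (PySem.List.pyGetD tile ((k : Int)) []) ((tile.length : Int) - 1 - (i : Int)) 0))
    = gridOf tile.length (fun i k => nget tile k (tile.length - 1 - i)) := by
  unfold gridOf
  refine List.map_congr_left (fun i hi => List.map_congr_left (fun k hk => ?_))
  have hi' : i < tile.length := List.mem_range.mp hi
  have hcast : (tile.length : Int) - 1 - (i : Int) = ((tile.length - 1 - i : Nat) : Int) := by omega
  rw [hcast, PySem.List.pyGetD_natCast, PySem.List.pyGetD_natCast]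
  rfl

-- the rotated grids agree
theorem rot_core_eq (tile : List (List Int)) (num : Int)
    (h : ∀ row ∈ tile, row.length = tile.length) :
    (List.range num.toNat).foldl (fun t _ => rotate_tile_90 t) tile =
      (let n := tile.length
       let r := if num > 0 then PySem.Int.mod num 4 else 0
       if r = 0 then tile
       else if r = 1 then
         (List.range n).map (fun (i : Nat) => (List.range n).map (fun (k : Nat) =>
           PySem.List.pyGetD (PySem.List.pyGetD tile ((n : Int) - 1 - (k : Int)) []) (i : Int) 0))
       else if r = 2 then
         (List.range n).map (fun (i : Nat) => (List.range n).map (fun (k : Nat) =>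
           PySem.List.pyGetD (PySem.List.pyGetD tile ((n : Int) - 1 - (i : Int)) []) ((n : Int) - 1 - (k : Int)) 0))
       else
         (List.range n).map (fun (i : Nat) => (List.range n).map (fun (k : Nat) =>
           PySem.List.pyGetD (PySem.List.pyGetD tile ((k : Int)) []) ((n : Int) - 1 - (i : Int)) 0))) := by
  simp only []
  by_cases hnum : num ≤ 0
  · have h0 : num.toNat = 0 := by omega
    have hr : ¬ num > 0 := by omega
    simp [h0, hr]
  · -- num > 0
    have hgt : num > 0 := by omega
    have hm4 : PySem.Int.mod num 4 = ((num.toNat % 4 : Nat) : Int) := by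
      rw [PySem.Int.mod_eq_emod_of_pos (by norm_num : (0:Int) < 4)]
      omega
    rw [foldl_range_iterate]
    conv_lhs => rw [square_eq_gridOf tile h]
    rw [rot90_iter_mod, bgrid1, bgrid2, bgrid3, hm4]
    simp only [hgt, if_pos]
    have hr4 : num.toNat % 4 < 4 := Nat.mod_lt _ (by norm_num)
    interval_cases hc : (num.toNat % 4)
    · simpa using (square_eq_gridOf tile h).symm
    · norm_num
      exact rot90_gridOf _ _
    · norm_num
      show rotate_tile_90 (rotate_tile_90 _) = _
      rw [rot90_gridOf, rot90_gridOf]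
    · norm_num
      show rotate_tile_90 (rotate_tile_90 (rotate_tile_90 _)) = _
      rw [rot90_gridOf, rot90_gridOf, rot90_gridOf]
      apply gridOf_congr
      intro i k hi hk
      congr 1
      omega

-- ===== VERDICT (by name: the statement is the Claim_ definition above) =====
theorem rotate_tile_spec : Claim_equal_rotate_tile := by
  intro tile num flip _ hpre
  unfold Spec_rotate_tile rotate_tile rotate_tile_alt
  have hcore : (List.range num.toNat).foldl (fun t _ => rotate_tile_90 t) tile =
      (let n := tile.length
       let r := if num > 0 then PySem.Int.mod num 4 else 0
       if r = 0 then tile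
       else if r = 1 then
         (List.range n).map (fun (i : Nat) => (List.range n).map (fun (k : Nat) =>
           PySem.List.pyGetD (PySem.List.pyGetD tile ((n : Int) - 1 - (k : Int)) []) (i : Int) 0))
       else if r = 2 then
         (List.range n).map (fun (i : Nat) => (List.range n).map (fun (k : Nat) =>
           PySem.List.pyGetD (PySem.List.pyGetD tile ((n : Int) - 1 - (i : Int)) []) ((n : Int) - 1 - (k : Int)) 0))
       else
         (List.range n).map (fun (i : Nat) => (List.range n).map (fun (k : Nat) =>
           PySem.List.pyGetD (PySem.List.pyGetD tile ((k : Int)) []) ((n : Int) - 1 - (i : Int)) 0))) := by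
    rcases hpre with hnum | hsq
    · have h0 : num.toNat = 0 := by omega
      have hr : ¬ num > 0 := by omega
      simp [h0, hr]
    · exact rot_core_eq tile num hsq
  rw [hcore]
  simp only []
  split_ifs <;> simp [flip_horizontal_eq, flip_vertical_eq]
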